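-- pv_equiv track=rewrite | github.com/ridingbytes/kaisho | kaisho/mcp/tiers.py | parse_tiers
-- ===== SOURCE A (Python) =====
-- VALID_TIERS = {"read", "write", "destructive"}
--
-- def parse_tiers(tier_str: str) -> set[str]:
--     """Parse comma-separated tier string.
--
--     ``write`` implies ``read``.
--     ``destructive`` implies both.
--     """
--     tiers = {
--         t.strip() for t in tier_str.split(",")
--     }
--     if "destructive" in tiers:
--         tiers |= {"read", "write"}
--     elif "write" in tiers:
--         tiers.add("read")
--     return tiers & VALID_TIERS
-- ===== SOURCE B (Python) =====
-- TIER_ORDER = ("read", "write", "destructive")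
--
-- def parse_tiers(tier_str: str) -> set[str]:
--     """Parse comma-separated tier string.
--
--     Each tier implies every lower tier: a single pass records the valid
--     tiers seen and the highest rank; everything strictly below that rank
--     is then added.
--     """
--     result = []
--     top = 0
--     for tok in tier_str.split(","):
--         t = tok.strip()
--         if t in TIER_ORDER:
--             top = max(top, TIER_ORDER.index(t))
--             if t not in result:
--                 result.append(t)
--     for t in TIER_ORDER[:top]:
--         if t not in result:
--             result.append(t)
--     return set(result)
-- ===== Notes on version B (the rewrite author's own statement) =====
-- stated objective: alternative
-- what changed: B replaces A's set algebra (dedup set of all tokens, if/elif union with implied tiers, final intersection with VALID_TIERS) by a single pass that keeps only valid tokens while tracking the highest tier's rank, then appends the tiers strictly below that rank; no union or intersection remains.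
import Mathlib
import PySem

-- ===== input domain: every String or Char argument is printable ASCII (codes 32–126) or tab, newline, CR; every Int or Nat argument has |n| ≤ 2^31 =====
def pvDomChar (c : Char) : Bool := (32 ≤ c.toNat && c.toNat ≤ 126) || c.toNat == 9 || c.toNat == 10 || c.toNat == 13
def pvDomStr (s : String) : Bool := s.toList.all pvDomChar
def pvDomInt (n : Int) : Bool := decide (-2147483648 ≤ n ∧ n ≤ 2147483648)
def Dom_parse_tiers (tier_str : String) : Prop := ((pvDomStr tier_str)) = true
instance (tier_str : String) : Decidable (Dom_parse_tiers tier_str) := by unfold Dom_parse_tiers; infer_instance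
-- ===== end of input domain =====

-- B replaces A's set algebra (union with implied tiers, final intersection) by one
-- pass keeping valid tokens and tracking the top rank, then appending the implied
-- lower tiers; alternative decomposition, same cost.


-- ===== PORT A =====
def VALID_TIERS : PySem.Set String := PySem.Set.ofList ["read", "write", "destructive"]

def parse_tiers (tier_str : String) : List String :=
  let tiers : PySem.Set String :=
    PySem.Set.ofList (((PySem.Chars.splitOn tier_str.toList [',']).map String.ofList).map (fun t => PySem.Str.strip t))
  let tiers :=
    if PySem.Set.contains tiers "destructive" then
      PySem.Set.union tiers ["read", "write"]
    else if PySem.Set.contains tiers "write" then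
      PySem.Set.add tiers "read"
    else
      tiers
  PySem.Set.inter tiers VALID_TIERS

-- ===== PORT B =====
def TIER_ORDER : List String := ["read", "write", "destructive"]

def parse_tiers_alt (tier_str : String) : List String :=
  let p : List String × Nat :=
    ((PySem.Chars.splitOn tier_str.toList [',']).map String.ofList).foldl
      (fun acc tok =>
        let t := PySem.Str.strip tok
        match PySem.List.index? TIER_ORDER t with
        | some i => (if t ∈ acc.1 then acc.1 else acc.1 ++ [t], max acc.2 i)
        | none => acc)
      ([], 0)
  PySem.Set.ofList
    ((PySem.List.slice TIER_ORDER none (some (p.2 : Int))).foldl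
      (fun acc t => if t ∈ acc then acc else acc ++ [t]) p.1)

-- ===== PRECONDITION & SPEC =====
def Spec_parse_tiers (tier_str : String) (out : List String) : Prop := out = parse_tiers_alt tier_str
instance (tier_str : String) (out : List String) : Decidable (Spec_parse_tiers tier_str out) := by unfold Spec_parse_tiers; infer_instance

-- ===== CLAIM (what is proved, stated in full; the proofs are below) =====
def Claim_equal_parse_tiers : Prop := ∀ (tier_str : String), Dom_parse_tiers tier_str → Spec_parse_tiers tier_str (parse_tiers tier_str)

-- ===== LEMMAS AND PROOFS =====

-- valid-tier test used by B's loop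
def pvValid (t : String) : Bool := (PySem.List.index? TIER_ORDER t).isSome

-- the two independent components of B's loop body
def pvF1 (a : List String) (t : String) : List String :=
  match PySem.List.index? TIER_ORDER t with
  | some _ => if t ∈ a then a else a ++ [t]
  | none => a

def pvF2 (b : Nat) (t : String) : Nat :=
  match PySem.List.index? TIER_ORDER t with
  | some i => max b i
  | none => b

-- the highest rank among the tiers occurring in T
def pvTop (T : List String) : Nat :=
  if "destructive" ∈ T then 2 else if "write" ∈ T then 1 else 0

theorem pvFold1 (T : List String) (a : List String) :
    T.foldl pvF1 a = (T.filter pvValid).foldl PySem.Set.add a := by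
  induction T generalizing a with
  | nil => rfl
  | cons t T ih =>
    cases h : List.idxOf? t TIER_ORDER with
    | some i =>
      have hm : t ∈ TIER_ORDER := by
        rw [← PySem.List.index?_isSome_iff, PySem.List.index?_eq_idxOf?, h]; rfl
      simp only [List.foldl_cons, List.filter_cons, pvValid, PySem.List.index?_eq_idxOf?, h,
        Option.isSome_some, if_pos, ih, pvF1, PySem.Set.add_eq_ite]
    | none =>
      simp [pvValid, PySem.List.index?_eq_idxOf?, h, pvF1, ih]

theorem pvTop_le (T : List String) : pvTop T ≤ 2 := by
  unfold pvTop; split_ifs <;> omega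

theorem pvTop_cons_other (t : String) (T : List String) (hd : t ≠ "destructive")
    (hw : t ≠ "write") : pvTop (t :: T) = pvTop T := by
  unfold pvTop
  simp [List.mem_cons, Ne.symm hd, Ne.symm hw]

theorem pvFold2 (T : List String) (b : Nat) :
    T.foldl pvF2 b = max b (pvTop T) := by
  induction T generalizing b with
  | nil => simp [pvTop]
  | cons t T ih =>
    have h2 := pvTop_le T
    rw [List.foldl_cons, ih]
    by_cases hd : t = "destructive"
    · subst hd
      rw [show pvF2 b "destructive" = max b 2 by
        simp [pvF2, show List.idxOf? "destructive" TIER_ORDER = some 2 from by decide]]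
      rw [show pvTop ("destructive" :: T) = 2 by simp [pvTop]]
      omega
    · by_cases hw : t = "write"
      · subst hw
        rw [show pvF2 b "write" = max b 1 by
          simp [pvF2, show List.idxOf? "write" TIER_ORDER = some 1 from by decide]]
        by_cases hdm : "destructive" ∈ T
        · rw [show pvTop ("write" :: T) = 2 by simp [pvTop, hdm],
            show pvTop T = 2 by simp [pvTop, hdm]]
          omega
        · have e1 : pvTop ("write" :: T) = 1 := by simp [pvTop, hdm]
          have e2 : pvTop T ≤ 1 := by unfold pvTop; simp [hdm]; split_ifs <;> omega
          rw [e1]; omega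
      · rw [pvTop_cons_other t T hd hw]
        by_cases hr : t = "read"
        · subst hr
          rw [show pvF2 b "read" = max b 0 by
            simp [pvF2, show List.idxOf? "read" TIER_ORDER = some 0 from by decide]]
          omega
        · have hnone : List.idxOf? t TIER_ORDER = none := by
            rw [← PySem.List.index?_eq_idxOf?, PySem.List.index?_eq_none_iff]
            simp [TIER_ORDER, hd, hw, hr]
          rw [show pvF2 b t = b by simp [pvF2, hnone]]

theorem pvOfList_filter (p : String → Bool) (T : List String) :
    PySem.Set.ofList (T.filter p) = (PySem.Set.ofList T).filter p := by
  induction T using List.reverseRecOn with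
  | nil => rfl
  | append_singleton T x ih =>
    rw [List.filter_append, PySem.Set.ofList_append_singleton, PySem.Set.add_eq_ite]
    by_cases hp : p x
    · rw [show List.filter p [x] = [x] by simp [hp], PySem.Set.ofList_append_singleton, ih,
        PySem.Set.add_eq_ite]
      by_cases hx : x ∈ PySem.Set.ofList T
      · have hx2 : x ∈ (PySem.Set.ofList T).filter p := List.mem_filter.2 ⟨hx, hp⟩
        simp [hx, hx2]
      · have hx2 : x ∉ (PySem.Set.ofList T).filter p := fun hc => hx (List.mem_filter.1 hc).1
        simp [hx, hx2, List.filter_append, hp]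
    · rw [show List.filter p [x] = [] by simp [hp], List.append_nil, ih]
      by_cases hx : x ∈ PySem.Set.ofList T <;> simp [hx, List.filter_append, hp]

theorem pvFilter_add (p : String → Bool) (s : List String) (x : String) (h : p x = true) :
    (PySem.Set.add s x).filter p = PySem.Set.add (s.filter p) x := by
  rw [PySem.Set.add_eq_ite, PySem.Set.add_eq_ite]
  by_cases hx : x ∈ s
  · have hx2 : x ∈ s.filter p := List.mem_filter.2 ⟨hx, h⟩
    simp [hx, hx2]
  · have hx2 : x ∉ s.filter p := fun hc => hx (List.mem_filter.1 hc).1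
    simp [hx, hx2, List.filter_append, h]

theorem pvContains_valid (t : String) : PySem.Set.contains VALID_TIERS t = pvValid t := by
  by_cases h : t ∈ TIER_ORDER
  · have h1 : PySem.Set.contains VALID_TIERS t = true := by
      rw [PySem.Set.contains_iff]
      simpa [VALID_TIERS, PySem.Set.mem_ofList, TIER_ORDER] using h
    have h2 : pvValid t = true := by
      simpa [pvValid, PySem.List.index?_isSome_iff] using h
    rw [h1, h2]
  · have h1 : PySem.Set.contains VALID_TIERS t = false := by
      rw [Bool.eq_false_iff]
      intro hc
      exact h (by simpa [VALID_TIERS, PySem.Set.mem_ofList, TIER_ORDER] using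
        (PySem.Set.contains_iff _ _).1 hc)
    have h2 : pvValid t = false := by
      rw [Bool.eq_false_iff]
      intro hc
      exact h (by simpa [pvValid, PySem.List.index?_isSome_iff] using hc)
    rw [h1, h2]

-- B's first loop, as a pair of independent folds over the stripped tokens
theorem pvPairFold (L : List String) (a : List String) (b : Nat) :
    L.foldl
      (fun acc tok =>
        let t := PySem.Str.strip tok
        match PySem.List.index? TIER_ORDER t with
        | some i => (if t ∈ acc.1 then acc.1 else acc.1 ++ [t], max acc.2 i)
        | none => acc)
      (a, b)
    = ((L.map PySem.Str.strip).foldl pvF1 a, (L.map PySem.Str.strip).foldl pvF2 b) := by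
  induction L generalizing a b with
  | nil => rfl
  | cons tok L ih =>
    rw [List.foldl_cons, List.map_cons, List.foldl_cons, List.foldl_cons]
    cases h : PySem.List.index? TIER_ORDER (PySem.Str.strip tok) with
    | some i => simp only [h, ih, pvF1, pvF2]
    | none => simp only [h, ih, pvF1, pvF2]

-- A's branch-and-intersect equals B's filtered pass plus appended implied tiers
theorem pvMain (T : List String) :
    PySem.Set.inter
      (if PySem.Set.contains (PySem.Set.ofList T) "destructive" then
        PySem.Set.union (PySem.Set.ofList T) ["read", "write"]
      else if PySem.Set.contains (PySem.Set.ofList T) "write" then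
        PySem.Set.add (PySem.Set.ofList T) "read"
      else
        PySem.Set.ofList T)
      VALID_TIERS
    = PySem.Set.ofList
        ((PySem.List.slice TIER_ORDER none (some ((pvTop T : Nat) : Int))).foldl
          (fun acc t => if t ∈ acc then acc else acc ++ [t])
          ((T.filter pvValid).foldl PySem.Set.add [])) := by
  have hF : (T.filter pvValid).foldl PySem.Set.add [] = (PySem.Set.ofList T).filter pvValid := by
    rw [← pvOfList_filter]; rfl
  have hFnodup : ((PySem.Set.ofList T).filter pvValid).Nodup :=
    List.Nodup.filter _ (PySem.Set.nodup_ofList T)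
  have hinter : ∀ X : List String, PySem.Set.inter X VALID_TIERS = X.filter pvValid := by
    intro X
    show X.filter (fun x => PySem.Set.contains VALID_TIERS x) = X.filter pvValid
    exact List.filter_congr (fun x _ => pvContains_valid x)
  have hslice : PySem.List.slice TIER_ORDER none (some ((pvTop T : Nat) : Int))
      = TIER_ORDER.take (pvTop T) := PySem.List.slice_to_natCast _ _
  have hcd : PySem.Set.contains (PySem.Set.ofList T) "destructive" = true
      ↔ "destructive" ∈ T := by rw [PySem.Set.contains_iff, PySem.Set.mem_ofList]
  have hcw : PySem.Set.contains (PySem.Set.ofList T) "write" = true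
      ↔ "write" ∈ T := by rw [PySem.Set.contains_iff, PySem.Set.mem_ofList]
  rw [hF, hslice]
  by_cases hd : "destructive" ∈ T
  · rw [if_pos (hcd.2 hd), hinter, show pvTop T = 2 by simp [pvTop, hd]]
    show (PySem.Set.add (PySem.Set.add (PySem.Set.ofList T) "read") "write").filter pvValid
      = PySem.Set.ofList (List.foldl _ _ ["read", "write"])
    rw [pvFilter_add _ _ _ (by decide), pvFilter_add _ _ _ (by decide)]
    simp only [List.foldl_cons, List.foldl_nil, ← PySem.Set.add_eq_ite]
    rw [PySem.Set.ofList_eq_self_of_nodup _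
      (PySem.Set.nodup_add _ _ (PySem.Set.nodup_add _ _ hFnodup))]
  · rw [if_neg (fun hc => hd (hcd.1 hc))]
    by_cases hw : "write" ∈ T
    · rw [if_pos (hcw.2 hw), hinter, show pvTop T = 1 by simp [pvTop, hd, hw]]
      show (PySem.Set.add (PySem.Set.ofList T) "read").filter pvValid
        = PySem.Set.ofList (List.foldl _ _ ["read"])
      rw [pvFilter_add _ _ _ (by decide)]
      simp only [List.foldl_cons, List.foldl_nil, ← PySem.Set.add_eq_ite]
      rw [PySem.Set.ofList_eq_self_of_nodup _ (PySem.Set.nodup_add _ _ hFnodup)]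
    · rw [if_neg (fun hc => hw (hcw.1 hc)), hinter, show pvTop T = 0 by simp [pvTop, hd, hw]]
      show (PySem.Set.ofList T).filter pvValid
        = PySem.Set.ofList (List.foldl _ _ (List.take 0 TIER_ORDER))
      rw [show List.take 0 TIER_ORDER = [] from rfl, List.foldl_nil,
        PySem.Set.ofList_eq_self_of_nodup _ hFnodup]

-- ===== VERDICT (by name: the statement is the Claim_ definition above) =====
theorem parse_tiers_spec : Claim_equal_parse_tiers := by
  intro tier_str _
  unfold Spec_parse_tiers parse_tiers parse_tiers_alt
  rw [pvPairFold, pvFold1, pvFold2, Nat.zero_max]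
  exact pvMain _
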